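-- pv_equiv track=rewrite | github.com/omar2381/CT_Hamming | zsdd25_CT.py | messageFromCodeword
-- ===== SOURCE A (Python) =====
-- def messageFromCodeword(c):
--     l = len(c)
--     r = 2
--     returner = []
--     lst = []
--
--     while l != (2**r - 1) and r <= l:
--         r = r + 1
--         if r > l:
--             return returner
--
--     for i in range(0, r):
--         lst.append(2 ** i)
--
--     for j in range(0, l):
--         if j + 1 not in lst:
--             returner.append(c[j])
--
--     return returner
-- ===== SOURCE B (Python) =====
-- def messageFromCodeword(c):
--     l = len(c)
--     if l & (l + 1) != 0:
--         return []
--     out = []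
--     p = 1
--     while p <= l:
--         out.extend(c[p : 2 * p - 1])
--         p *= 2
--     return out
-- ===== Notes on version B (the rewrite author's own statement) =====
-- stated objective: faster
-- what changed: B validates the length with a closed-form bitwise power-of-two test and extracts the message as whole contiguous slices c[p:2p-1] between consecutive parity positions with a doubling pointer, instead of A's iterative r-search, built list of powers and per-element membership scan.
import Mathlib
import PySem

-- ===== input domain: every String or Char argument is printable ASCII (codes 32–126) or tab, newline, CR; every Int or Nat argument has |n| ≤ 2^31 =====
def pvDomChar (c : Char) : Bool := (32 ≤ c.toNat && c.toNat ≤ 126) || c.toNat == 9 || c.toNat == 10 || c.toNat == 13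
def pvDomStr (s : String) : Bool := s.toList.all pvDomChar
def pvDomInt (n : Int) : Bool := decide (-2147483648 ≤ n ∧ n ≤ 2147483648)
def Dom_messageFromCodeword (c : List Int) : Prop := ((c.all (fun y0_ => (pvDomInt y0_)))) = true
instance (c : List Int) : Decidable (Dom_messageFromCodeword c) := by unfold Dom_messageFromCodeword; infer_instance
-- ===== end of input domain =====

-- B validates the length by one bitwise power-of-two test and extracts the message as the
-- contiguous slices c[p:2p-1] between consecutive parity positions, with a doubling pointer
-- (objective: alternative — no r-search, no list of powers, no per-element membership test).

-- ===== PORT A =====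
-- the while loop: returns `none` for the early 'return returner' (= []), `some r` when it exits normally
def pvALoop (l r : Nat) : Option Nat :=
  if l ≠ 2 ^ r - 1 ∧ r ≤ l then
    if r + 1 > l then none else pvALoop l (r + 1)
  else some r
termination_by l + 1 - r
decreasing_by omega

def messageFromCodeword (c : List Int) : List Int :=
  match pvALoop c.length 2 with
  | none => []
  | some r =>
    let lst := (List.range r).foldl (fun acc i => acc ++ [2 ^ i]) ([] : List Nat)
    -- c[j] is always in range here; `.getD 0` only discharges the option
    (List.range c.length).foldl
      (fun acc (j : Nat) => if j + 1 ∉ lst then acc ++ [(PySem.List.pyGet? c (j : Int)).getD 0] else acc) []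

-- ===== PORT B =====
-- the while loop over the doubling pointer p; '1 ≤ p' only serves termination (p starts at 1)
def pvBChunks (c : List Int) (p : Nat) : List Int :=
  if _h : 1 ≤ p ∧ p ≤ c.length then
    PySem.List.slice c (some (p : Int)) (some ((2 * p - 1 : Nat) : Int)) ++ pvBChunks c (p * 2)
  else []
termination_by c.length + 1 - p
decreasing_by omega

def messageFromCodeword_alt (c : List Int) : List Int :=
  if c.length &&& (c.length + 1) ≠ 0 then [] else pvBChunks c 1

-- ===== PRECONDITION & SPEC =====
def Spec_messageFromCodeword (c : List Int) (out : List Int) : Prop := out = messageFromCodeword_alt c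
instance (c : List Int) (out : List Int) : Decidable (Spec_messageFromCodeword c out) := by unfold Spec_messageFromCodeword; infer_instance

-- ===== CLAIM =====
def Claim_equal_messageFromCodeword : Prop := ∀ (c : List Int), Dom_messageFromCodeword c → Spec_messageFromCodeword c (messageFromCodeword c)

-- ===== LEMMAS AND PROOFS =====

-- "n is a power of two", as a Bool (the bound k < n+1 makes the ∃ decidable)
def p2 (n : Nat) : Bool := decide (∃ k < n + 1, n = 2 ^ k)

lemma p2_iff (n : Nat) : p2 n = true ↔ ∃ k, n = 2 ^ k := by
  simp only [p2, decide_eq_true_eq]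
  constructor
  · rintro ⟨k, _, h⟩; exact ⟨k, h⟩
  · rintro ⟨k, h⟩
    refine ⟨k, ?_, h⟩
    have := Nat.lt_two_pow_self (n := k)
    omega

lemma p2_false_between (m n : Nat) (h1 : 2 ^ m < n) (h2 : n < 2 ^ (m + 1)) : p2 n = false := by
  rw [Bool.eq_false_iff]
  intro hc
  obtain ⟨k, hk⟩ := (p2_iff n).mp hc
  subst hk
  have hmk : m < k := (Nat.pow_lt_pow_iff_right (a := 2) (by norm_num)).mp h1
  have hkm : k < m + 1 := (Nat.pow_lt_pow_iff_right (a := 2) (by norm_num)).mp h2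
  omega

-- the canonical message: the elements of c at 0-based indices j ≥ p with j+1 not a power of two
def msgIdx (c : List Int) (p : Nat) : List Int :=
  ((List.range' p (c.length - p)).filter (fun j => !p2 (j + 1))).map
    (fun (j : Nat) => (PySem.List.pyGet? c (j : Int)).getD 0)

lemma map_get_range' : ∀ (k a : Nat) (c : List Int), a + k ≤ c.length →
    (List.range' a k).map (fun (j : Nat) => (PySem.List.pyGet? c (j : Int)).getD 0)
      = (c.drop a).take k := by
  intro k
  induction k with
  | zero => intro a c h; simp
  | succ k ih =>
    intro a c h
    have ha : a < c.length := by omega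
    rw [List.range'_succ, List.map_cons, ih (a + 1) c (by omega),
      List.drop_eq_getElem_cons ha, List.take_succ_cons]
    simp [ha]

-- B's chunk loop produces exactly the non-parity elements from index 2^m on
lemma chunks_eq : ∀ (d : Nat) (c : List Int) (m : Nat), c.length + 1 - 2 ^ m ≤ d →
    pvBChunks c (2 ^ m) = msgIdx c (2 ^ m) := by
  intro d
  induction d with
  | zero =>
    intro c m h
    have h1 : (1:Nat) ≤ 2 ^ m := Nat.one_le_two_pow
    rw [pvBChunks, dif_neg (by omega)]
    unfold msgIdx
    rw [show c.length - 2 ^ m = 0 by omega]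
    rfl
  | succ d ih =>
    intro c m h
    have h1 : (1:Nat) ≤ 2 ^ m := Nat.one_le_two_pow
    by_cases hpl : 2 ^ m ≤ c.length
    · rw [pvBChunks, dif_pos ⟨h1, hpl⟩]
      have hpow : 2 ^ m * 2 = 2 ^ (m + 1) := by rw [pow_succ]
      rw [hpow, ih c (m + 1) (by omega)]
      -- abbreviations
      set l := c.length with hl
      set p := 2 ^ m with hp
      have hslice : PySem.List.slice c (some (p : Int)) (some ((2 * p - 1 : Nat) : Int))
          = (c.drop p).take (2 * p - 1 - p) := PySem.List.slice_natCast c p (2 * p - 1)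
      set u := min (2 * p - 1) l with hu
      set t := min (2 * p) l with ht
      have hdl : (c.drop p).length = l - p := by simp [hl]
      have htake : (c.drop p).take (2 * p - 1 - p) = (c.drop p).take (u - p) := by
        by_cases hc : 2 * p - 1 ≤ l
        · rw [show u = 2 * p - 1 by omega]
        · rw [show u = l by omega,
            List.take_of_length_le (by rw [hdl]; omega),
            List.take_of_length_le (by rw [hdl])]
      rw [hslice, htake, ← map_get_range' (u - p) p c (by omega)]
      -- split the index range:  [p, l) = [p, u) ++ [u, t) ++ [t, l)
      unfold msgIdx
      have hsplit1 : List.range' p (l - p) = List.range' p (t - p) ++ List.range' t (l - t) := by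
        rw [show l - p = (t - p) + (l - t) by omega, ← List.range'_append,
          show p + 1 * (t - p) = t by omega]
      have hsplit2 : List.range' p (t - p) = List.range' p (u - p) ++ List.range' u (t - u) := by
        rw [show t - p = (u - p) + (t - u) by omega, ← List.range'_append,
          show p + 1 * (u - p) = u by omega]
      rw [hsplit1, hsplit2, List.filter_append, List.filter_append, List.map_append,
        List.map_append]
      -- first block: every index survives the filter
      have hfirst : (List.range' p (u - p)).filter (fun j => !p2 (j + 1)) = List.range' p (u - p) := by
        apply List.filter_eq_self.mpr
        intro j hj
        have hjm := List.mem_range'_1.mp hj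
        have : p2 (j + 1) = false := by
          apply p2_false_between m
          · omega
          · have : 2 ^ (m + 1) = 2 * 2 ^ m := by rw [pow_succ]; ring
            omega
        simp [this]
      -- second block: at most the single parity index 2p-1, filtered away
      have hsecond : (List.range' u (t - u)).filter (fun j => !p2 (j + 1)) = [] := by
        apply List.filter_eq_nil_iff.mpr
        intro j hj
        have hjm := List.mem_range'_1.mp hj
        have hj' : j = 2 * p - 1 := by omega
        have : p2 (j + 1) = true := by
          apply (p2_iff _).mpr
          exact ⟨m + 1, by rw [hj']; rw [pow_succ]; omega⟩
        simp [this]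
      -- third block: it is msgIdx from 2p on (both are empty when l < 2p)
      have hthird : List.range' t (l - t) = List.range' (2 * p) (l - 2 * p) := by
        by_cases hc : 2 * p ≤ l
        · rw [show t = 2 * p by omega]
        · rw [show t = l by omega, show l - l = 0 by omega, show l - 2 * p = 0 by omega]
          simp
      rw [hfirst, hsecond, hthird]
      have hp2 : 2 ^ (m + 1) = 2 * p := by rw [pow_succ]; ring
      rw [hp2]
      simp [← hl]
    · rw [pvBChunks, dif_neg (by omega)]
      unfold msgIdx
      rw [show c.length - 2 ^ m = 0 by omega]
      rfl

-- the while-loop characterisation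
lemma aloop_pow_aux : ∀ (d k r : Nat), 2 ≤ r → r ≤ k → k - r = d → pvALoop (2 ^ k - 1) r = some k := by
  intro d
  induction d with
  | zero =>
    intro k r _ hrk hd
    have : r = k := by omega
    subst this
    rw [pvALoop]
    simp
  | succ d ih =>
    intro k r h2 hrk hd
    have hrltk : r < k := by omega
    have hpow : (2:Nat) ^ r < 2 ^ k := Nat.pow_lt_pow_right (by norm_num) hrltk
    have hk : k < 2 ^ k := Nat.lt_two_pow_self
    have hr1 : (1:Nat) ≤ 2 ^ r := Nat.one_le_two_pow
    rw [pvALoop]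
    rw [if_pos (by constructor <;> omega)]
    rw [if_neg (by omega)]
    exact ih k (r + 1) (by omega) (by omega) (by omega)

lemma aloop_none_aux : ∀ (d l r : Nat), (¬ ∃ k, l + 1 = 2 ^ k) → r ≤ l → l - r = d → pvALoop l r = none := by
  intro d
  induction d with
  | zero =>
    intro l r hp hrl hd
    have : r = l := by omega
    subst this
    rw [pvALoop]
    rw [if_pos ⟨fun hc => hp ⟨r, by have : (1:Nat) ≤ 2 ^ r := Nat.one_le_two_pow; omega⟩, le_refl _⟩]
    rw [if_pos (by omega)]
  | succ d ih =>
    intro l r hp hrl hd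
    rw [pvALoop]
    rw [if_pos ⟨fun hc => hp ⟨r, by have : (1:Nat) ≤ 2 ^ r := Nat.one_le_two_pow; omega⟩, hrl⟩]
    rw [if_neg (by omega)]
    exact ih l (r + 1) hp (by omega) (by omega)

-- the closed-form check:  l &&& (l+1) = 0  ↔  l+1 is a power of two
lemma land_succ_eq_zero_iff (l : Nat) : l &&& (l + 1) = 0 ↔ ∃ k, l + 1 = 2 ^ k := by
  constructor
  · intro h
    induction l using Nat.strong_induction_on with
    | _ l ih =>
      rcases Nat.even_or_odd l with he | ho
      · obtain ⟨m, hm⟩ := he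
        have hm0 : m = 0 := by
          apply Nat.eq_of_testBit_eq
          intro i
          rw [Nat.zero_testBit]
          have hbit := congrArg (fun n => n.testBit (i + 1)) h
          simp only [Nat.testBit_and, Nat.zero_testBit] at hbit
          rw [Nat.testBit_add_one, Nat.testBit_add_one] at hbit
          have h1 : l / 2 = m := by omega
          have h2 : (l + 1) / 2 = m := by omega
          rw [h1, h2, Bool.and_self] at hbit
          exact hbit
        exact ⟨0, by omega⟩
      · obtain ⟨m, hm⟩ := ho
        have hsub : m &&& (m + 1) = 0 := by
          apply Nat.eq_of_testBit_eq
          intro i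
          rw [Nat.zero_testBit, Nat.testBit_and]
          have hbit := congrArg (fun n => n.testBit (i + 1)) h
          simp only [Nat.testBit_and, Nat.zero_testBit] at hbit
          rw [Nat.testBit_add_one, Nat.testBit_add_one] at hbit
          have h1 : l / 2 = m := by omega
          have h2 : (l + 1) / 2 = m + 1 := by omega
          rw [h1, h2] at hbit
          exact hbit
        obtain ⟨k, hk⟩ := ih m (by omega) hsub
        refine ⟨k + 1, ?_⟩
        have : 2 ^ (k + 1) = 2 * 2 ^ k := by rw [pow_succ]; ring
        omega
  · rintro ⟨k, hk⟩
    apply Nat.eq_of_testBit_eq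
    intro i
    have hl : l = 2 ^ k - 1 := by omega
    rw [hl, Nat.zero_testBit, Nat.testBit_and,
      show 2 ^ k - 1 + 1 = 2 ^ k by have : (1:Nat) ≤ 2 ^ k := Nat.one_le_two_pow; omega,
      Nat.testBit_two_pow_sub_one, Nat.testBit_two_pow]
    by_cases hik : i < k
    · simp [hik]; omega
    · simp [hik]

-- A's extraction loop equals msgIdx c 1 whenever lst covers all powers of two below the length bound
lemma A_fold_eq (c : List Int) (r : Nat) (hbound : ∀ j, j < c.length → j + 1 < 2 ^ r) :
    (List.range c.length).foldl
      (fun acc (j : Nat) => if j + 1 ∉ (List.range r).foldl (fun acc i => acc ++ [2 ^ i]) ([] : List Nat)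
        then acc ++ [(PySem.List.pyGet? c (j : Int)).getD 0] else acc) []
    = msgIdx c 1 := by
  rw [PySem.List.foldl_append_singleton_eq_map, List.nil_append]
  rw [PySem.List.foldl_append_ite]
  rw [List.nil_append]
  unfold msgIdx
  have hrange : List.range c.length = List.range' 0 c.length := List.range_eq_range'
  rw [hrange]
  -- peel index 0 (parity position 1) off the range, it is filtered away on both sides
  rcases Nat.eq_zero_or_pos c.length with h0 | hpos
  · rw [h0]; rfl
  · rw [show c.length = (c.length - 1) + 1 by omega, List.range'_succ, Nat.add_sub_cancel,
      List.filter_cons]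
    have h01 : (0:Nat) + 1 ∈ (List.range r).map (HPow.hPow 2) := by
      simp only [List.mem_map, List.mem_range]
      refine ⟨0, ?_, by norm_num⟩
      by_contra hc
      have h0r : r = 0 := by omega
      have := hbound 0 hpos
      rw [h0r] at this
      norm_num at this
    rw [if_neg (by simp [h01])]
    simp only [Nat.zero_add]
    congr 1
    apply List.filter_congr
    intro j hj
    have hjm := List.mem_range'_1.mp hj
    have hjn : j < c.length := by omega
    simp only [decide_not]
    congr 1
    rw [Bool.eq_iff_iff, decide_eq_true_eq, p2_iff]
    simp only [List.mem_map, List.mem_range]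
    constructor
    · rintro ⟨i, _, hi⟩; exact ⟨i, hi.symm⟩
    · rintro ⟨k, hk⟩
      refine ⟨k, ?_, hk.symm⟩
      have := hbound j hjn
      by_contra hc
      have : (2:Nat) ^ r ≤ 2 ^ k := Nat.pow_le_pow_right (by norm_num) (by omega)
      omega

-- ===== VERDICT =====
theorem messageFromCodeword_spec : Claim_equal_messageFromCodeword := by
  intro c _
  unfold Spec_messageFromCodeword messageFromCodeword messageFromCodeword_alt
  by_cases hp : ∃ k, c.length + 1 = 2 ^ k
  · rw [if_neg (by simpa using (land_succ_eq_zero_iff c.length).mpr hp)]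
    rw [show (1:Nat) = 2 ^ 0 by rfl, chunks_eq (c.length + 1 - 2 ^ 0) c 0 (le_refl _)]
    rw [show (2:Nat) ^ 0 = 1 by rfl]
    obtain ⟨k, hk⟩ := hp
    by_cases hk2 : 2 ≤ k
    · have hl : c.length = 2 ^ k - 1 := by omega
      rw [hl, aloop_pow_aux (k - 2) k 2 (by omega) hk2 rfl]
      rw [← hl]
      exact A_fold_eq c k (by intro j hj; omega)
    · have hl : c.length ≤ 1 := by
        interval_cases k <;> omega
      have : pvALoop c.length 2 = some 2 := by
        rw [pvALoop]; rw [if_neg (by omega)]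
      rw [this]
      exact A_fold_eq c 2 (by intro j hj; omega)
  · rw [if_pos (by simpa using fun hc => hp ((land_succ_eq_zero_iff c.length).mp hc))]
    have hl2 : 2 ≤ c.length := by
      by_contra hc
      apply hp
      interval_cases h : c.length
      · exact ⟨0, rfl⟩
      · exact ⟨1, rfl⟩
    rw [aloop_none_aux (c.length - 2) c.length 2 hp (by omega) rfl]
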